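-- pv_equiv track=rewrite | github.com/tungbo20021/ChamThi | ChamDiem.py | sorting_ans_p2
-- ===== SOURCE A (Python) =====
-- def generate_output(key_map_21, key_map_22, combined_indices, offset):
--         result = []
--         for i, (index_21, index_22) in enumerate(combined_indices):
--             prefix = str(1 + offset) if index_21 in [0, 1] else str(2 + offset)
--             output_string = f"{prefix}{key_map_22[index_22]}-{key_map_21[index_21]}"
--             result.append(output_string)
--         return result
--
-- def sorting_ans_p2(key_map_21, key_map_22, combined_indices_list):
--     all_outputs = []
--     for loop_index, combined_indices in enumerate(combined_indices_list):
--         offset = loop_index * 2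
--         output = generate_output(key_map_21, key_map_22, combined_indices, offset)
--         all_outputs.extend(output)
--
--     # Sắp xếp lại kết quả theo tiền tố
--     all_outputs.sort(key=lambda x: int(x[0]))
--     return all_outputs
-- ===== SOURCE B (Python) =====
-- def sorting_ans_p2(key_map_21, key_map_22, combined_indices_list):
--     all_outputs = []
--     for loop_index, combined_indices in enumerate(combined_indices_list):
--         for index_21, index_22 in combined_indices:
--             prefix = str(1 + 2 * loop_index) if index_21 in (0, 1) else str(2 + 2 * loop_index)
--             all_outputs.append(f"{prefix}{key_map_22[index_22]}-{key_map_21[index_21]}")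
--     digits = sorted({int(s[0]) for s in all_outputs})
--     return [s for d in digits for s in all_outputs if int(s[0]) == d]
-- ===== Notes on version B (the rewrite author's own statement) =====
-- stated objective: alternative
-- what changed: Inlined the helper/extend loops into one flat building pass and replaced the final key-based library sort with a stable bucket pass: collect the distinct leading digits, sort them, and concatenate the groups in build order.
import Mathlib
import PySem

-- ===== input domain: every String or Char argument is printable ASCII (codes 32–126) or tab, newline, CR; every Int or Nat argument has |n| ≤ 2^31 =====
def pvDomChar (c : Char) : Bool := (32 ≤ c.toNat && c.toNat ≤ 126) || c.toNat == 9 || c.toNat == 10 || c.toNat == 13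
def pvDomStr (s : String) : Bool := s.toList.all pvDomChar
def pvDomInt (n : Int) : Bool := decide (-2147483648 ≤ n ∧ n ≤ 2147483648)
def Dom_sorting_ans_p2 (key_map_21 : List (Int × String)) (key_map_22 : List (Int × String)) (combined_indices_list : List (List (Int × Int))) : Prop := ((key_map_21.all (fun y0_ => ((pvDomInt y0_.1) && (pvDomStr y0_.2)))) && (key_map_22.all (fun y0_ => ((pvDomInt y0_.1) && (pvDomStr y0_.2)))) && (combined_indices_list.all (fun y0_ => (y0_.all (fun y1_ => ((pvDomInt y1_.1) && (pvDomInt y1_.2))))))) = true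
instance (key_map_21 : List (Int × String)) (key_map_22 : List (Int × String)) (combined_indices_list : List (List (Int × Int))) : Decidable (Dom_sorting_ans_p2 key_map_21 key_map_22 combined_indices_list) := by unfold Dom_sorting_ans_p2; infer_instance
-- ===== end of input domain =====

-- B replaces A's final key-based library sort with a stable bucket pass (sorted distinct
-- leading digits, then concatenation of the groups in build order); same return value.

-- ===== PORT A =====
-- int(x[0]) of an output string; the fallback 0 branches are unreachable (every output
-- string starts with a decimal digit), so the key Python's sort uses is computed exactly.
def pvKeyA (s : String) : Int :=
  match PySem.Str.pyGet? s 0 with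
  | some c => (PySem.Int.ofStr? (String.ofList [c])).getD 0
  | none => 0

-- generate_output: dict lookups may raise KeyError in Python, hence Option (none = raise).
def generate_output (key_map_21 : List (Int × String)) (key_map_22 : List (Int × String)) (combined_indices : List (Int × Int)) (offset : Int) : Option (List String) :=
  (PySem.List.enumerate combined_indices 0).foldl (fun acc p =>
    acc.bind fun result =>
      (PySem.Dict.get? ⟨key_map_22⟩ p.2.2).bind fun v22 =>
        (PySem.Dict.get? ⟨key_map_21⟩ p.2.1).map fun v21 =>
          result ++ [(if p.2.1 = 0 ∨ p.2.1 = 1 then PySem.Int.toStr (1 + offset) else PySem.Int.toStr (2 + offset)) ++ v22 ++ "-" ++ v21]) (some [])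

def sorting_ans_p2 (key_map_21 : List (Int × String)) (key_map_22 : List (Int × String)) (combined_indices_list : List (List (Int × Int))) : List String :=
  let all_outputs : Option (List String) :=
    (PySem.List.enumerate combined_indices_list 0).foldl (fun acc p =>
      acc.bind fun res => (generate_output key_map_21 key_map_22 p.2 (p.1 * 2)).map (fun out => res ++ out)) (some [])
  -- `.getD []` is reached only when a lookup raised (none), excluded by Pre_
  PySem.List.sorted (all_outputs.getD []) pvKeyA false

-- ===== PORT B =====
def pvKeyB (s : String) : Int :=
  match PySem.Str.pyGet? s 0 with
  | some c => (PySem.Int.ofStr? (String.ofList [c])).getD 0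
  | none => 0

def sorting_ans_p2_alt (key_map_21 : List (Int × String)) (key_map_22 : List (Int × String)) (combined_indices_list : List (List (Int × Int))) : List String :=
  let all_outputs : Option (List String) :=
    (PySem.List.enumerate combined_indices_list 0).foldl (fun acc p =>
      p.2.foldl (fun acc2 q =>
        acc2.bind fun res =>
          (PySem.Dict.get? ⟨key_map_22⟩ q.2).bind fun v22 =>
            (PySem.Dict.get? ⟨key_map_21⟩ q.1).map fun v21 =>
              res ++ [(if q.1 = 0 ∨ q.1 = 1 then PySem.Int.toStr (1 + 2 * p.1) else PySem.Int.toStr (2 + 2 * p.1)) ++ v22 ++ "-" ++ v21]) acc) (some [])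
  let xs := all_outputs.getD []
  let digits := PySem.List.sorted (PySem.Set.ofList (xs.map pvKeyB)) (fun x => x) false
  digits.flatMap (fun d => xs.filter (fun s => pvKeyB s == d))

-- ===== PRECONDITION & SPEC =====
-- Pre_ excludes exactly the inputs where Python A raises KeyError: some referenced index
-- missing from key_map_21 / key_map_22.
def Pre_sorting_ans_p2 (key_map_21 : List (Int × String)) (key_map_22 : List (Int × String)) (combined_indices_list : List (List (Int × Int))) : Prop :=
  (combined_indices_list.all (fun ci => ci.all (fun q =>
    PySem.Dict.contains (⟨key_map_21⟩ : PySem.Dict Int String) q.1 &&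
    PySem.Dict.contains (⟨key_map_22⟩ : PySem.Dict Int String) q.2))) = true
instance (key_map_21 : List (Int × String)) (key_map_22 : List (Int × String)) (combined_indices_list : List (List (Int × Int))) : Decidable (Pre_sorting_ans_p2 key_map_21 key_map_22 combined_indices_list) := by unfold Pre_sorting_ans_p2; infer_instance

def pvWitness_sorting_ans_p2 : (List (Int × String)) × (List (Int × String)) × (List (List (Int × Int))) :=
  ([(0, "A"), (2, "B")], [(0, "x"), (1, "y")], [[(0, 1), (2, 0)], [(2, 1)]])

def Spec_sorting_ans_p2 (key_map_21 : List (Int × String)) (key_map_22 : List (Int × String)) (combined_indices_list : List (List (Int × Int))) (out : List String) : Prop := out = sorting_ans_p2_alt key_map_21 key_map_22 combined_indices_list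
instance (key_map_21 : List (Int × String)) (key_map_22 : List (Int × String)) (combined_indices_list : List (List (Int × Int))) (out : List String) : Decidable (Spec_sorting_ans_p2 key_map_21 key_map_22 combined_indices_list out) := by unfold Spec_sorting_ans_p2; infer_instance

-- ===== CLAIM (what is proved, stated in full; the proofs are below) =====
def Claim_equal_sorting_ans_p2 : Prop := ∀ (key_map_21 : List (Int × String)) (key_map_22 : List (Int × String)) (combined_indices_list : List (List (Int × Int))), Dom_sorting_ans_p2 key_map_21 key_map_22 combined_indices_list → Pre_sorting_ans_p2 key_map_21 key_map_22 combined_indices_list → Spec_sorting_ans_p2 key_map_21 key_map_22 combined_indices_list (sorting_ans_p2 key_map_21 key_map_22 combined_indices_list)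

-- ===== LEMMAS AND PROOFS =====

theorem pvKeyB_eq_pvKeyA : pvKeyB = pvKeyA := rfl

-- the shared shape of both builders' inner step: try to format one entry
def pvStep (h : Int × Int → Option String) : Option (List String) → Int × Int → Option (List String) :=
  fun acc q => acc.bind fun res => (h q).map fun v => res ++ [v]

theorem pvFold_none (h : Int × Int → Option String) (ci : List (Int × Int)) :
    ci.foldl (pvStep h) none = none := by
  induction ci with
  | nil => rfl
  | cons q ci ih => simpa [pvStep] using ih

theorem pvFold_shift (h : Int × Int → Option String) (ci : List (Int × Int)) :
    ∀ (r s : List String),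
      ci.foldl (pvStep h) (some (r ++ s)) = (ci.foldl (pvStep h) (some s)).map (r ++ ·) := by
  induction ci with
  | nil => intro r s; rfl
  | cons q ci ih =>
    intro r s
    cases hq : h q with
    | none => simp [pvStep, hq, pvFold_none]
    | some v =>
      have : r ++ s ++ [v] = r ++ (s ++ [v]) := by simp
      simp only [List.foldl_cons, pvStep, Option.bind_some, hq, Option.map_some, this]
      exact ih r (s ++ [v])

-- foldl over enumerate with a step that ignores the index = foldl over the list
theorem pvFoldl_enumerate_ignore {α β : Type} (f : β → α → β) :
    ∀ (xs : List α) (s : Int) (a : β),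
      (PySem.List.enumerate xs s).foldl (fun acc p => f acc p.2) a = xs.foldl f a := by
  intro xs
  induction xs with
  | nil => intro s a; rfl
  | cons x xs ih =>
    intro s a
    rw [PySem.List.enumerate_cons]
    simpa using ih (s + 1) (f a x)

-- insertBy helpers
theorem pvInsertBy_skip {α : Type} (before : α → α → Bool) (x : α) (l1 l2 : List α)
    (h : ∀ y ∈ l1, before x y = false) :
    PySem.List.insertBy before x (l1 ++ l2) = l1 ++ PySem.List.insertBy before x l2 := by
  induction l1 with
  | nil => rfl
  | cons y l1 ih =>
    have hy : before x y = false := h y (by simp)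
    simp only [List.cons_append, PySem.List.insertBy, hy, Bool.false_eq_true, if_false]
    simpa using ih (fun z hz => h z (by simp [hz]))

theorem pvInsertBy_all_before {α : Type} (before : α → α → Bool) (x : α) (l : List α)
    (h : ∀ y ∈ l, before x y = true) :
    PySem.List.insertBy before x l = x :: l := by
  cases l with
  | nil => rfl
  | cons y l => simp [PySem.List.insertBy, h y (by simp)]

theorem pvFlatMap_congr {α β : Type} (ds : List α) (f g : α → List β)
    (h : ∀ d ∈ ds, f d = g d) : ds.flatMap f = ds.flatMap g := by
  induction ds with
  | nil => rfl
  | cons d ds ih =>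
    simp only [List.flatMap_cons, h d (by simp), ih (fun e he => h e (by simp [he]))]

-- inserting x into a bucket decomposition appends it at the end of its bucket
theorem pvInsertBy_flatMap {α : Type} (k : α → Int) (x : α) (ds : List Int) (gs : Int → List α)
    (hpw : ds.Pairwise (· < ·)) (hx : k x ∈ ds)
    (hg : ∀ d ∈ ds, ∀ y ∈ gs d, k y = d) :
    PySem.List.insertBy (fun a b => decide (k a < k b)) x (ds.flatMap gs)
      = ds.flatMap (fun d => gs d ++ if k x = d then [x] else []) := by
  induction ds with
  | nil => cases hx
  | cons d ds ih =>
    have hlt : ∀ d' ∈ ds, d < d' := (List.pairwise_cons.mp hpw).1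
    have hpw' := (List.pairwise_cons.mp hpw).2
    simp only [List.flatMap_cons]
    by_cases hxd : k x = d
    · have h1 : ∀ y ∈ gs d, (decide (k x < k y)) = false := by
        intro y hy
        have := hg d (by simp) y hy
        simp [this, hxd]
      have h2 : ∀ y ∈ ds.flatMap gs, (decide (k x < k y)) = true := by
        intro y hy
        rcases List.mem_flatMap.mp hy with ⟨d', hd', hyd'⟩
        have := hg d' (by simp [hd']) y hyd'
        have := hlt d' hd'
        simp_all
      rw [pvInsertBy_skip _ _ _ _ h1, pvInsertBy_all_before _ _ _ h2]
      have hne : ∀ d' ∈ ds, ¬ (k x = d') := by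
        intro d' hd' he
        exact absurd (hxd ▸ he ▸ hlt d' hd') (lt_irrefl _)
      rw [pvFlatMap_congr ds (fun d' => gs d' ++ if k x = d' then [x] else []) gs
        (by intro d' hd'; simp [hne d' hd'])]
      simp [hxd]
    · have hx' : k x ∈ ds := by
        rcases List.mem_cons.mp hx with h | h
        · exact absurd h hxd
        · exact h
      have h1 : ∀ y ∈ gs d, (decide (k x < k y)) = false := by
        intro y hy
        have hyk := hg d (by simp) y hy
        have : d < k x := hlt _ hx'
        simp [hyk]; omega
      rw [pvInsertBy_skip _ _ _ _ h1,
        ih hpw' hx' (fun d' hd' y hy => hg d' (by simp [hd']) y hy)]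
      simp [hxd]

-- the stable sort by an Int key is the concatenation of its key-buckets, for any strictly
-- increasing list of key values covering the list
theorem pvSorted_eq_flatMap_filter {α : Type} (k : α → Int) (xs : List α) (ds : List Int)
    (hpw : ds.Pairwise (· < ·)) (hmem : ∀ s ∈ xs, k s ∈ ds) :
    PySem.List.sorted xs k false = ds.flatMap (fun d => xs.filter (fun s => k s == d)) := by
  induction xs using List.reverseRecOn with
  | nil => simp [PySem.List.sorted]
  | append_singleton xs x ih =>
    have hmem' : ∀ s ∈ xs, k s ∈ ds := fun s hs => hmem s (by simp [hs])
    rw [PySem.List.sorted_eq_foldl_insertBy, List.foldl_append, List.foldl_cons, List.foldl_nil,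
      ← PySem.List.sorted_eq_foldl_insertBy, ih hmem',
      pvInsertBy_flatMap k x ds _ hpw (hmem x (by simp))
        (fun d _ y hy => by
          have := List.mem_filter.mp hy
          exact of_decide_eq_true (by simpa using this.2))]
    refine pvFlatMap_congr _ _ _ (fun d _ => ?_)
    by_cases hxd : k x = d <;> simp [List.filter_append, hxd]

-- the builders of all_outputs agree (Option-threaded in the same order)
theorem pvBuilders_eq (key_map_21 key_map_22 : List (Int × String)) (combined_indices_list : List (List (Int × Int))) :
    (PySem.List.enumerate combined_indices_list 0).foldl (fun acc p =>
        acc.bind fun res => (generate_output key_map_21 key_map_22 p.2 (p.1 * 2)).map (fun out => res ++ out)) (some [])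
    = (PySem.List.enumerate combined_indices_list 0).foldl (fun acc p =>
        p.2.foldl (fun acc2 q =>
          acc2.bind fun res =>
            (PySem.Dict.get? ⟨key_map_22⟩ q.2).bind fun v22 =>
              (PySem.Dict.get? ⟨key_map_21⟩ q.1).map fun v21 =>
                res ++ [(if q.1 = 0 ∨ q.1 = 1 then PySem.Int.toStr (1 + 2 * p.1) else PySem.Int.toStr (2 + 2 * p.1)) ++ v22 ++ "-" ++ v21]) acc) (some []) := by
  have hstep : ∀ (off : Int) (ci : List (Int × Int)) (acc : Option (List String)),
      acc.bind (fun res => (generate_output key_map_21 key_map_22 ci off).map (fun out => res ++ out))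
      = ci.foldl (pvStep (fun q =>
          (PySem.Dict.get? ⟨key_map_22⟩ q.2).bind fun v22 =>
            (PySem.Dict.get? ⟨key_map_21⟩ q.1).map fun v21 =>
              (if q.1 = 0 ∨ q.1 = 1 then PySem.Int.toStr (1 + off) else PySem.Int.toStr (2 + off)) ++ v22 ++ "-" ++ v21)) acc := by
    intro off ci acc
    have hgen : generate_output key_map_21 key_map_22 ci off
        = ci.foldl (pvStep (fun q =>
            (PySem.Dict.get? ⟨key_map_22⟩ q.2).bind fun v22 =>
              (PySem.Dict.get? ⟨key_map_21⟩ q.1).map fun v21 =>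
                (if q.1 = 0 ∨ q.1 = 1 then PySem.Int.toStr (1 + off) else PySem.Int.toStr (2 + off)) ++ v22 ++ "-" ++ v21)) (some []) := by
      unfold generate_output
      have he : (fun (acc : Option (List String)) (p : Int × (Int × Int)) =>
          acc.bind fun result =>
            (PySem.Dict.get? (⟨key_map_22⟩ : PySem.Dict Int String) p.2.2).bind fun v22 =>
              (PySem.Dict.get? (⟨key_map_21⟩ : PySem.Dict Int String) p.2.1).map fun v21 =>
                result ++ [(if p.2.1 = 0 ∨ p.2.1 = 1 then PySem.Int.toStr (1 + off) else PySem.Int.toStr (2 + off)) ++ v22 ++ "-" ++ v21])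
          = (fun acc p => pvStep (fun q =>
              (PySem.Dict.get? (⟨key_map_22⟩ : PySem.Dict Int String) q.2).bind fun v22 =>
                (PySem.Dict.get? (⟨key_map_21⟩ : PySem.Dict Int String) q.1).map fun v21 =>
                  (if q.1 = 0 ∨ q.1 = 1 then PySem.Int.toStr (1 + off) else PySem.Int.toStr (2 + off)) ++ v22 ++ "-" ++ v21) acc p.2) := by
        funext a p
        cases a with
        | none => rfl
        | some res =>
          cases h2 : PySem.Dict.get? (⟨key_map_22⟩ : PySem.Dict Int String) p.2.2 with
          | none => simp [pvStep, h2]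
          | some v22 =>
            cases h1 : PySem.Dict.get? (⟨key_map_21⟩ : PySem.Dict Int String) p.2.1 with
            | none => simp [pvStep, h2, h1]
            | some v21 => simp [pvStep, h2, h1]
      rw [he, pvFoldl_enumerate_ignore]
    rw [hgen]
    cases acc with
    | none => rw [pvFold_none]; rfl
    | some res =>
      have := pvFold_shift (fun q =>
          (PySem.Dict.get? (⟨key_map_22⟩ : PySem.Dict Int String) q.2).bind fun v22 =>
            (PySem.Dict.get? (⟨key_map_21⟩ : PySem.Dict Int String) q.1).map fun v21 =>
              (if q.1 = 0 ∨ q.1 = 1 then PySem.Int.toStr (1 + off) else PySem.Int.toStr (2 + off)) ++ v22 ++ "-" ++ v21) ci res []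
      simp only [List.append_nil] at this
      rw [this]
      rfl
  congr 1
  funext acc p
  rw [hstep (p.1 * 2) p.2 acc]
  congr 1
  funext a q
  cases a with
  | none => rfl
  | some res =>
    cases h2 : PySem.Dict.get? (⟨key_map_22⟩ : PySem.Dict Int String) q.2 with
    | none => simp [pvStep, h2]
    | some v22 =>
      cases h1 : PySem.Dict.get? (⟨key_map_21⟩ : PySem.Dict Int String) q.1 with
      | none => simp [pvStep, h2, h1]
      | some v21 => simp [pvStep, h2, h1, Int.mul_comm p.1 2]

-- ===== VERDICT (by name: the statement is the Claim_ definition above) =====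
theorem sorting_ans_p2_spec : Claim_equal_sorting_ans_p2 := by
  intro key_map_21 key_map_22 combined_indices_list _ _
  unfold Spec_sorting_ans_p2 sorting_ans_p2 sorting_ans_p2_alt
  rw [pvBuilders_eq]
  set xs := ((PySem.List.enumerate combined_indices_list 0).foldl (fun acc p =>
        p.2.foldl (fun acc2 q =>
          acc2.bind fun res =>
            (PySem.Dict.get? ⟨key_map_22⟩ q.2).bind fun v22 =>
              (PySem.Dict.get? ⟨key_map_21⟩ q.1).map fun v21 =>
                res ++ [(if q.1 = 0 ∨ q.1 = 1 then PySem.Int.toStr (1 + 2 * p.1) else PySem.Int.toStr (2 + 2 * p.1)) ++ v22 ++ "-" ++ v21]) acc) (some [])).getD [] with hxs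
  rw [pvKeyB_eq_pvKeyA]
  exact pvSorted_eq_flatMap_filter pvKeyA xs
    (PySem.List.sorted (PySem.Set.ofList (xs.map pvKeyA)) (fun x => x) false)
    (PySem.List.sorted_ofList_pairwise_lt _)
    (fun s hs => (PySem.List.mem_sorted _ _ _ _).mpr
      ((PySem.Set.mem_ofList _ _).mpr (List.mem_map_of_mem hs)))
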